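-- pv_equiv track=rewrite | github.com/rishi1001/AI_Poker_2025 | submission/player.py | tuple_to_int_5
-- ===== SOURCE A (Python) =====
-- import math
-- import math
--
-- def tuple_to_int_5(t):
--     """
--     Maps a 5-tuple of integers (0-9) (order doesn't matter, so it's sorted)
--     with repetition allowed to a unique integer in 0..2001.
--
--     Steps:
--       1. Sort the tuple in non-decreasing order.
--       2. Transform each element: y[i] = sorted_tuple[i] + i, which yields a strictly increasing sequence.
--       3. Rank the combination y among all 5-combinations of numbers from 0 to 13.
--     """
--     # Ensure a canonical order.
--     t_sorted = sorted(t)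
--     # Transform to a strictly increasing tuple.
--     y = [t_sorted[i] + i for i in range(5)]
--
--     # n is now 10 (possible original values) + 5 - 1 = 14, so valid numbers are 0..13.
--     n = 14
--     k = 5
--     rank = 0
--     prev = 0
--     # For each position, count how many combinations come before the given number.
--     for i in range(k):
--         for j in range(prev, y[i]):
--             rank += math.comb(n - j - 1, k - i - 1)
--         prev = y[i] + 1
--     return rank
-- ===== SOURCE B (Python) =====
-- import math
--
-- def _block(prev, v, r):
--     # combinations contributed by one position, as a hockey-stick closed form
--     return math.comb(14 - prev, r) - math.comb(14 - v, r) if prev < v else 0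
--
-- def tuple_to_int_5(t):
--     # Loop-free closed form: unpack the five sorted values and add each position's
--     # whole contribution in O(1) instead of enumerating skipped values.
--     s0, s1, s2, s3, s4 = sorted(t)[:5]
--     y0, y1, y2, y3, y4 = s0, s1 + 1, s2 + 2, s3 + 3, s4 + 4
--     return (_block(0, y0, 5) + _block(y0 + 1, y1, 4) + _block(y1 + 1, y2, 3)
--             + _block(y2 + 1, y3, 2) + _block(y3 + 1, y4, 1))
-- ===== Notes on version B (the rewrite author's own statement) =====
-- stated objective: simpler
-- what changed: A's stateful double loop (outer loop over positions with (rank, prev) state, inner term-by-term enumeration of every skipped value with one math.comb call each) becomes a loop-free closed form: the five sorted values are unpacked and each position's whole contribution is the hockey-stick block comb(14-prev,r) - comb(14-v,r), computed in O(1).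
import Mathlib
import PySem

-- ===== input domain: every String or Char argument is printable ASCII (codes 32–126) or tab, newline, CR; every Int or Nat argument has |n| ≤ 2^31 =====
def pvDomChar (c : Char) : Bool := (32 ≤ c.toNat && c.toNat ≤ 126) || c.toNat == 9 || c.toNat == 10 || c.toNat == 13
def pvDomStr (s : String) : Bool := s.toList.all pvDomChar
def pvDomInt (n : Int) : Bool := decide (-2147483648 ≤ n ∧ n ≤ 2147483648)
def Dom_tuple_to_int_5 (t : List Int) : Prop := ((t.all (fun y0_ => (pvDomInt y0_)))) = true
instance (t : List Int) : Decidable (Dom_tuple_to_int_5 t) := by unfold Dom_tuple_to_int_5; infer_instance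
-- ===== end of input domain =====

-- B replaces A's stateful double loop by a loop-free closed form: the five sorted
-- values are unpacked and each position adds its hockey-stick block — objective: simpler.


-- ===== PORT A =====
-- math.comb(a, b): exact where Python returns a value; Python raises ValueError for a
-- negative first argument — Pre_ excludes every input whose execution reaches such a call.
def pycomb (a : Int) (b : Nat) : Int :=
  if a < 0 then 0 else ((a.toNat.choose b : Nat) : Int)

def tuple_to_int_5 (t : List Int) : Int :=
  let tSorted := PySem.List.sorted t (fun x => x) false
  let y := (PySem.List.pyRange 0 5 1).map (fun i => PySem.List.pyGetD tSorted i 0 + i)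
  -- n = 14, k = 5; state = (rank, prev); i : Nat ranges over range(5), so k-i-1 is 5-i-1
  let res := (List.range 5).foldl
    (fun (s : Int × Int) (i : Nat) =>
      ((PySem.List.pyRange s.2 (PySem.List.pyGetD y (i : Int) 0) 1).foldl
          (fun r j => r + pycomb (14 - j - 1) (5 - i - 1)) s.1,
       PySem.List.pyGetD y (i : Int) 0 + 1))
    (0, 0)
  res.1

-- ===== PORT B =====
-- Source B's '_block(prev, v, r)': one position's contribution as a closed-form block.
def tupBlock (prev v : Int) (r : Nat) : Int :=
  if prev < v then pycomb (14 - prev) r - pycomb (14 - v) r else 0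

def tuple_to_int_5_alt (t : List Int) : Int :=
  match PySem.List.slice (PySem.List.sorted t (fun x => x) false) none (some 5) with
  | [s0, s1, s2, s3, s4] =>
    tupBlock 0 s0 5 + tupBlock (s0 + 1) (s1 + 1) 4 + tupBlock (s1 + 1 + 1) (s2 + 2) 3
      + tupBlock (s2 + 2 + 1) (s3 + 3) 2 + tupBlock (s3 + 3 + 1) (s4 + 4) 1
  | _ => 0  -- Python's 5-way unpacking raises ValueError here; excluded by Pre_

-- ===== PRECONDITION & SPEC =====
-- the k-th smallest value of t (sorted(t)[k]), used only to state Pre_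
def pvS (t : List Int) (k : Nat) : Int :=
  (PySem.List.sorted t (fun x => x) false).getD k 0

-- Pre_ is exactly where Python A returns: at least five values (else IndexError), and no
-- position's inner range reaches 14 (else math.comb raises ValueError): for each position
-- either its value is small enough or its range is empty (a repeat of the previous value).
def Pre_tuple_to_int_5 (t : List Int) : Prop :=
  5 ≤ t.length ∧
  (pvS t 0 ≤ 14 ∨ pvS t 0 ≤ 0) ∧
  (pvS t 1 ≤ 13 ∨ pvS t 1 ≤ pvS t 0) ∧
  (pvS t 2 ≤ 12 ∨ pvS t 2 ≤ pvS t 1) ∧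
  (pvS t 3 ≤ 11 ∨ pvS t 3 ≤ pvS t 2) ∧
  (pvS t 4 ≤ 10 ∨ pvS t 4 ≤ pvS t 3)
instance (t : List Int) : Decidable (Pre_tuple_to_int_5 t) := by
  unfold Pre_tuple_to_int_5; infer_instance
def pvWitness_tuple_to_int_5 : List Int := [3, 1, 4, 1, 5]

def Spec_tuple_to_int_5 (t : List Int) (out : Int) : Prop := out = tuple_to_int_5_alt t
instance (t : List Int) (out : Int) : Decidable (Spec_tuple_to_int_5 t out) := by
  unfold Spec_tuple_to_int_5; infer_instance

-- ===== CLAIM (what is proved, stated in full; the proofs are below) =====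
def Claim_equal_tuple_to_int_5 : Prop :=
  ∀ (t : List Int), Dom_tuple_to_int_5 t → Pre_tuple_to_int_5 t →
    Spec_tuple_to_int_5 t (tuple_to_int_5 t)

-- ===== LEMMAS AND PROOFS =====

-- Pascal's rule for pycomb on a non-negative first argument.
theorem pycomb_pascal (m : Int) (r : Nat) (hm : 0 ≤ m) :
    pycomb (m + 1) (r + 1) = pycomb m (r + 1) + pycomb m r := by
  unfold pycomb
  rw [if_neg (by omega), if_neg (by omega), if_neg (by omega)]
  have h : (m + 1).toNat = m.toNat + 1 := by omega
  rw [h, Nat.choose_succ_succ]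
  push_cast; ring

-- Hockey-stick evaluation of A's inner loop on a non-raising nonempty range.
theorem pvInnerSum (r : Nat) (b : Int) (hb : b ≤ 14) :
    ∀ (n : Nat) (a : Int), a ≤ b → (b - a).toNat = n →
    (List.map (fun x => pycomb (14 - x - 1) r) (PySem.List.pyRange a b 1)).sum
      = pycomb (14 - a) (r + 1) - pycomb (14 - b) (r + 1) := by
  intro n
  induction n with
  | zero =>
    intro a hab hn
    have : a = b := by omega
    subst this
    rw [PySem.List.pyRange_one_eq_nil le_rfl]
    simp
  | succ n ih =>
    intro a hab hn
    have hlt : a < b := by omega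
    rw [PySem.List.pyRange_one_cons hlt, List.map_cons, List.sum_cons]
    rw [ih (a + 1) (by omega) (by omega)]
    rw [show (14 : Int) - a = (14 - a - 1) + 1 by ring,
        pycomb_pascal (14 - a - 1) r (by omega)]
    ring_nf

-- One position: A's enumerated segment equals B's guarded closed-form block,
-- given A does not raise there (value small enough, or empty range).
theorem pvSeg (r : Nat) (lo hi : Int) (h : hi ≤ 14 ∨ hi ≤ lo) :
    (List.map (fun x => pycomb (14 - x - 1) r) (PySem.List.pyRange lo hi 1)).sum
      = if lo < hi then pycomb (14 - lo) (r + 1) - pycomb (14 - hi) (r + 1) else 0 := by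
  by_cases hc : lo < hi
  · rw [if_pos hc]
    exact pvInnerSum r hi (by omega) (hi - lo).toNat lo (by omega) rfl
  · rw [if_neg hc, PySem.List.pyRange_one_eq_nil (by omega)]
    simp

-- ===== VERDICT (by name: the statement is the Claim_ definition above) =====
theorem tuple_to_int_5_spec : Claim_equal_tuple_to_int_5 := by
  intro t _ hpre
  obtain ⟨hlen, hc0, hc1, hc2, hc3, hc4⟩ := hpre
  unfold Spec_tuple_to_int_5 tuple_to_int_5 tuple_to_int_5_alt
  unfold pvS at hc0 hc1 hc2 hc3 hc4
  have h5 : 5 ≤ (PySem.List.sorted t (fun x => x) false).length := by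
    rw [PySem.List.length_sorted]; exact hlen
  rcases hL : PySem.List.sorted t (fun x => x) false with
      _ | ⟨a0, _ | ⟨a1, _ | ⟨a2, _ | ⟨a3, _ | ⟨a4, rest⟩⟩⟩⟩⟩ <;>
    rw [hL] at h5 <;> simp only [List.length_cons, List.length_nil] at h5
  · omega
  · omega
  · omega
  · omega
  · omega
  rw [hL] at hc0 hc1 hc2 hc3 hc4
  simp only [List.getD_cons_zero, List.getD_cons_succ] at hc0 hc1 hc2 hc3 hc4
  -- reduce B's slice and unfold its five closed-form blocks
  rw [PySem.List.slice_to _ (by norm_num)]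
  simp only [show ((5 : Int).toNat) = 5 from rfl, List.take_succ_cons, List.take_zero]
  simp only [tupBlock]
  -- reduce A's loop over range(5)
  simp only [List.range_succ, List.range_zero, List.foldl_cons, List.foldl_nil,
    List.nil_append, List.cons_append]
  simp only [pysem]
  norm_num [List.range_succ, List.take_succ_cons, List.getElem?_cons_zero, List.getElem?_cons_succ,
    PySem.List.pyGetD_ofNat', List.getElem_cons_zero, List.getElem_cons_succ]
  -- evaluate the five inner loops in closed form
  rw [pvSeg 4 0 a0 (by omega)]
  rw [pvSeg 3 (a0 + 1) (a1 + 1) (by omega)]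
  rw [pvSeg 2 (a1 + 1 + 1) (a2 + 2) (by omega)]
  rw [pvSeg 1 (a2 + 2 + 1) (a3 + 3) (by omega)]
  rw [pvSeg 0 (a3 + 3 + 1) (a4 + 4) (by omega)]
  norm_num
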